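-- pv_equiv track=rewrite | github.com/jasencarroll/create-fastapi-react | utils/template.py | should_exclude
-- ===== SOURCE A (Python) =====
-- def should_exclude(item: str, patterns: list[str]) -> bool:
--     for pattern in patterns:
--         if pattern.startswith("*."):
--             if item.endswith(pattern[1:]):
--                 return True
--         elif item == pattern:
--             return True
--     return False
-- ===== SOURCE B (Python) =====
-- def should_exclude(item: str, patterns: list[str]) -> bool:
--     # A pattern matches iff it equals item, or it is "*" + s where s is a
--     # suffix of item beginning with "."; so enumerate those candidate
--     # patterns from item and test set intersection with the pattern list.
--     candidates = {item}
--     for i, ch in enumerate(item):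
--         if ch == ".":
--             candidates.add("*" + item[i:])
--     return not candidates.isdisjoint(patterns)
-- ===== Notes on version B (the rewrite author's own statement) =====
-- stated objective: alternative
-- what changed: Instead of branching per pattern, B derives from the item the complete set of patterns that could match it (the item itself plus '*'+s for every suffix s of the item starting with '.') and returns whether that candidate set intersects the pattern list.
import Mathlib
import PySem

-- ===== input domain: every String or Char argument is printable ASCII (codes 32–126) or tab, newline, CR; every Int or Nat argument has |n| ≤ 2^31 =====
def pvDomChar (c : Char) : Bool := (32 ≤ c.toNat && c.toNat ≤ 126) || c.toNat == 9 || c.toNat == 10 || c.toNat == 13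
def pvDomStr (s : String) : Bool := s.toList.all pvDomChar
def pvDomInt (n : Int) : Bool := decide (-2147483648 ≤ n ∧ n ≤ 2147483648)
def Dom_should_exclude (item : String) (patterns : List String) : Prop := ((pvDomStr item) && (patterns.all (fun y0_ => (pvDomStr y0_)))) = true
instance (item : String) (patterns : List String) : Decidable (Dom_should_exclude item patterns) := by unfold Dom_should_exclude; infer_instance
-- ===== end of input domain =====

-- B derives the candidate matching patterns from the item (the item itself plus "*"+each
-- dot-initial suffix) and tests set intersection with the pattern list (alternative algorithm).


-- ===== PORT A =====
def should_exclude (item : String) (patterns : List String) : Bool :=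
  match patterns with
  | [] => false
  | pattern :: rest =>
    if PySem.Str.startswith pattern "*." then
      if PySem.Str.endswith item (PySem.Str.slice pattern (some 1) none) then true
      else should_exclude item rest
    else if item == pattern then true
    else should_exclude item rest

-- ===== PORT B =====
def should_exclude_alt (item : String) (patterns : List String) : Bool :=
  let candidates :=
    (PySem.List.enumerate item.toList 0).foldl
      (fun (c : PySem.Set String) p =>
        if p.2 == '.' then
          -- "*" + item[i:]  ('+' on str is concatenation: built as a cons on the char list, exact)
          PySem.Set.add c (String.ofList ('*' :: (PySem.Str.slice item (some p.1) none).toList))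
        else c)
      (PySem.Set.ofList [item])
  !(PySem.Set.isdisjoint candidates patterns)

-- ===== PRECONDITION & SPEC =====
def Spec_should_exclude (item : String) (patterns : List String) (out : Bool) : Prop := out = should_exclude_alt item patterns
instance (item : String) (patterns : List String) (out : Bool) : Decidable (Spec_should_exclude item patterns out) := by unfold Spec_should_exclude; infer_instance

-- ===== CLAIM (what is proved, stated in full; the proofs are below) =====
def Claim_equal_should_exclude : Prop := ∀ (item : String) (patterns : List String), Dom_should_exclude item patterns → Spec_should_exclude item patterns (should_exclude item patterns)

-- ===== LEMMAS AND PROOFS =====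

-- A's per-pattern test, factored out for the proof
def pvMatch (item pattern : String) : Bool :=
  if PySem.Str.startswith pattern "*." then
    PySem.Str.endswith item (PySem.Str.slice pattern (some 1) none)
  else item == pattern

theorem should_exclude_eq_any (item : String) (patterns : List String) :
    should_exclude item patterns = patterns.any (pvMatch item) := by
  induction patterns with
  | nil => rfl
  | cons p rest ih =>
    simp only [should_exclude, List.any_cons, pvMatch]
    split_ifs with h <;> cases hm : PySem.Str.endswith item (PySem.Str.slice p (some 1) none) <;>
      simp_all
  
theorem eq_ofList_iff (x : String) (cs : List Char) : x = String.ofList cs ↔ x.toList = cs := by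
  constructor
  · rintro rfl; simp
  · intro h; apply String.toList_inj.mp; simp [h]

theorem pvMatch_iff (item p : String) :
    pvMatch item p = true ↔
      (p = item ∨ ∃ k, ∃ h : k < item.toList.length,
        item.toList[k] = '.' ∧ p.toList = '*' :: item.toList.drop k) := by
  unfold pvMatch
  by_cases hs : PySem.Str.startswith p "*." = true
  · rw [if_pos hs]
    rw [PySem.Str.startswith_eq, PySem.Chars.startswith_iff] at hs
    obtain ⟨t, ht⟩ := hs
    have hp : p.toList = '*' :: '.' :: t := by rw [← ht]; rfl
    have hsl : PySem.List.slice p.toList (some 1) = p.toList.drop 1 := by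
      exact_mod_cast PySem.List.slice_from_natCast p.toList 1
    rw [PySem.Str.endswith_eq, PySem.Str.toList_slice, PySem.Chars.slice_eq_listSlice,
      hsl, PySem.Chars.endswith_iff, hp]
    simp only [List.drop_succ_cons, List.drop_zero]
    constructor
    · intro hsuf
      right
      have hd := List.suffix_iff_eq_drop.mp hsuf
      set k := item.toList.length - ('.' :: t).length with hk
      have hklt : k < item.toList.length := by
        by_contra hge
        have : item.toList.drop k = [] := List.drop_eq_nil_iff.mpr (by omega)
        rw [← hd] at this; exact List.cons_ne_nil _ _ this
      refine ⟨k, hklt, ?_, ?_⟩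
      · have : item.toList.drop k = '.' :: t := hd.symm
        have h0 : (item.toList.drop k)[0]'(by rw [this]; simp) = '.' := by
          simp [this]
        rw [List.getElem_drop] at h0
        simpa using h0
      · rw [← hd]
    · rintro (rfl | ⟨k, hk, hdot, hlist⟩)
      · have h1 : '.' :: t = p.toList.drop 1 := by simp [hp]
        rw [h1]; exact List.drop_suffix _ _
      · have hdk : item.toList.drop k = '.' :: t := by
          injection hlist with _ h; exact h.symm
        rw [← hdk]; exact List.drop_suffix _ _
  · rw [if_neg hs]
    constructor
    · intro h
      left
      exact (beq_iff_eq.mp h).symm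
    · rintro (rfl | ⟨k, hk, hdot, hlist⟩)
      · exact beq_self_eq_true _
      · exfalso
        apply hs
        rw [PySem.Str.startswith_eq, PySem.Chars.startswith_iff]
        have hdk : item.toList.drop k = item.toList[k] :: item.toList.drop (k + 1) :=
          List.drop_eq_getElem_cons hk
        rw [hdk, hdot] at hlist
        exact ⟨item.toList.drop (k + 1), by simp [hlist]⟩

theorem mem_foldl_step (item x : String) (l : List (Int × Char)) (s : PySem.Set String) :
    x ∈ l.foldl
      (fun (c : PySem.Set String) p =>
        if p.2 == '.' then
          PySem.Set.add c (String.ofList ('*' :: (PySem.Str.slice item (some p.1) none).toList))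
        else c) s ↔
      (x ∈ s ∨ ∃ pr ∈ l, pr.2 = '.' ∧
        x = String.ofList ('*' :: (PySem.Str.slice item (some pr.1) none).toList)) := by
  induction l generalizing s with
  | nil => simp
  | cons q rest ih =>
    rw [List.foldl_cons]
    split_ifs with hq
    · rw [ih]
      have hq' : q.2 = '.' := beq_iff_eq.mp hq
      simp only [PySem.Set.mem_add, List.exists_mem_cons_iff, hq', true_and]
      exact or_assoc
    · rw [ih]
      have hq' : ¬ q.2 = '.' := fun h => hq (beq_iff_eq.mpr h)
      simp only [List.exists_mem_cons_iff, hq', false_and, false_or]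

theorem mem_candidates (item x : String) :
    x ∈ (PySem.List.enumerate item.toList 0).foldl
      (fun (c : PySem.Set String) p =>
        if p.2 == '.' then
          PySem.Set.add c (String.ofList ('*' :: (PySem.Str.slice item (some p.1) none).toList))
        else c)
      (PySem.Set.ofList [item]) ↔
      (x = item ∨ ∃ k, ∃ h : k < item.toList.length,
        item.toList[k] = '.' ∧ x.toList = '*' :: item.toList.drop k) := by
  rw [mem_foldl_step]
  simp only [PySem.Set.mem_ofList, List.mem_cons, List.not_mem_nil, or_false]
  apply or_congr Iff.rfl
  constructor
  · rintro ⟨pr, hmem, hdot, hx⟩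
    obtain ⟨k, hk, rfl⟩ := (PySem.List.mem_enumerate_iff _ _ _).mp hmem
    refine ⟨k, hk, by simpa using hdot, ?_⟩
    rw [eq_ofList_iff] at hx
    rw [hx]
    simp [PySem.Str.toList_slice, PySem.Chars.slice_eq_listSlice,
      PySem.List.slice_from_natCast item.toList k]
  · rintro ⟨k, hk, hdot, hx⟩
    refine ⟨((0 : Int) + k, item.toList[k]), (PySem.List.mem_enumerate_iff _ _ _).mpr ⟨k, hk, rfl⟩,
      hdot, ?_⟩
    rw [eq_ofList_iff]
    simp [PySem.Str.toList_slice, PySem.Chars.slice_eq_listSlice,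
      PySem.List.slice_from_natCast item.toList k, hx]

-- ===== VERDICT (by name: the statement is the Claim_ definition above) =====
theorem should_exclude_spec : Claim_equal_should_exclude := by
  intro item patterns _
  unfold Spec_should_exclude should_exclude_alt
  rw [should_exclude_eq_any]
  rw [Bool.eq_iff_iff]
  simp only [List.any_eq_true, Bool.not_eq_true', ← Bool.not_eq_true,
    PySem.Set.isdisjoint_iff]
  push Not
  constructor
  · rintro ⟨p, hp, hm⟩
    exact ⟨p, (mem_candidates item p).2 ((pvMatch_iff item p).1 hm), hp⟩
  · rintro ⟨x, hx, hxp⟩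
    exact ⟨x, hxp, (pvMatch_iff item x).2 ((mem_candidates item x).1 hx)⟩
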